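-- pv_equiv track=rewrite | github.com/lalawee/capstone-vla | dataset_tools/parquet_to_csv.py | build_vector_column_names
-- ===== SOURCE A (Python) =====
-- def build_vector_column_names(prefix: str) -> list[str]:
--     """
--     Build the 44 column names for a state or action vector.
--     prefix is either 'state' or 'action'.
--     """
--     cols = []
--
--     # left_arm: 7 DOF  [0:7]
--     cols += [f"{prefix}.left_arm.joint_{i+1}" for i in range(7)]
--
--     # left_hand: 6 DOF  [7:13]
--     cols += [
--         f"{prefix}.left_hand.thumbCMC",
--         f"{prefix}.left_hand.thumbMCP",
--         f"{prefix}.left_hand.indexMCP",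
--         f"{prefix}.left_hand.middleMCP",
--         f"{prefix}.left_hand.ringMCP",
--         f"{prefix}.left_hand.littleMCP",
--     ]
--
--     # left_leg: 6 DOF  [13:19]  — zeros in sim
--     cols += [f"{prefix}.left_leg.{i}" for i in range(6)]
--
--     # neck: 3 DOF  [19:22]  — zeros in sim
--     cols += [f"{prefix}.neck.{i}" for i in range(3)]
--
--     # right_arm: 7 DOF  [22:29]
--     cols += [f"{prefix}.right_arm.joint_{i+1}" for i in range(7)]
--
--     # right_hand: 6 DOF  [29:35]
--     cols += [
--         f"{prefix}.right_hand.thumbCMC",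
--         f"{prefix}.right_hand.thumbMCP",
--         f"{prefix}.right_hand.indexMCP",
--         f"{prefix}.right_hand.middleMCP",
--         f"{prefix}.right_hand.ringMCP",
--         f"{prefix}.right_hand.littleMCP",
--     ]
--
--     # right_leg: 6 DOF  [35:41]  — zeros in sim
--     cols += [f"{prefix}.right_leg.{i}" for i in range(6)]
--
--     # waist: 3 DOF  [41:44]  — zeros in sim
--     cols += [f"{prefix}.waist.{i}" for i in range(3)]
--
--     return cols  # 44 column names total
-- ===== SOURCE B (Python) =====
-- HAND_SUFFIXES = ["thumbCMC", "thumbMCP", "indexMCP", "middleMCP", "ringMCP", "littleMCP"]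
--
-- SEGMENTS = [
--     ("left_arm", "joint", 7),
--     ("left_hand", "hand", 6),
--     ("left_leg", "index", 6),
--     ("neck", "index", 3),
--     ("right_arm", "joint", 7),
--     ("right_hand", "hand", 6),
--     ("right_leg", "index", 6),
--     ("waist", "index", 3),
-- ]
--
-- def build_vector_column_names(prefix: str) -> list[str]:
--     cols = []
--     for seg, style, n in SEGMENTS:
--         for i in range(n):
--             if style == "joint":
--                 suffix = f"joint_{i+1}"
--             elif style == "hand":
--                 suffix = HAND_SUFFIXES[i]
--             else:
--                 suffix = str(i)
--             cols.append(f"{prefix}.{seg}.{suffix}")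
--     return cols
-- ===== Notes on version B (the rewrite author's own statement) =====
-- stated objective: simpler
-- what changed: Replaces eight hardcoded concatenation blocks with a single segment spec table (name, style, DOF count) traversed by one loop that dispatches on the style to generate each suffix.
import Mathlib
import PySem

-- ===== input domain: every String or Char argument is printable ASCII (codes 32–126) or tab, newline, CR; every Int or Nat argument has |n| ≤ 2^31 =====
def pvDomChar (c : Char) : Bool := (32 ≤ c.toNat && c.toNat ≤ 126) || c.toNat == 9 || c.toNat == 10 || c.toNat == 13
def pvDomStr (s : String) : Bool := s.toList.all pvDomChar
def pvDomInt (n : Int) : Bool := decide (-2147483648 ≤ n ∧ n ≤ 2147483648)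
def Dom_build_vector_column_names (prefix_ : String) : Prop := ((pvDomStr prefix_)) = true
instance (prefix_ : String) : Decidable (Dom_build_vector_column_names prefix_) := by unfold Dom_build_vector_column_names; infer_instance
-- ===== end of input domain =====

-- B replaces A's eight hardcoded concatenation blocks by a spec table of segments
-- plus one loop dispatching on the segment's style (objective: simpler).

-- ===== PORT A =====
def build_vector_column_names (prefix_ : String) : List String :=
  let cols : List String := []
  -- left_arm: 7 DOF
  let cols := cols ++ (PySem.List.pyRange 0 7 1).map
    (fun i => prefix_ ++ (".left_arm.joint_" ++ PySem.Int.toStr (i + 1)))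
  -- left_hand: 6 DOF
  let cols := cols ++
    [ prefix_ ++ ".left_hand.thumbCMC",
      prefix_ ++ ".left_hand.thumbMCP",
      prefix_ ++ ".left_hand.indexMCP",
      prefix_ ++ ".left_hand.middleMCP",
      prefix_ ++ ".left_hand.ringMCP",
      prefix_ ++ ".left_hand.littleMCP" ]
  -- left_leg: 6 DOF
  let cols := cols ++ (PySem.List.pyRange 0 6 1).map
    (fun i => prefix_ ++ (".left_leg." ++ PySem.Int.toStr i))
  -- neck: 3 DOF
  let cols := cols ++ (PySem.List.pyRange 0 3 1).map
    (fun i => prefix_ ++ (".neck." ++ PySem.Int.toStr i))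
  -- right_arm: 7 DOF
  let cols := cols ++ (PySem.List.pyRange 0 7 1).map
    (fun i => prefix_ ++ (".right_arm.joint_" ++ PySem.Int.toStr (i + 1)))
  -- right_hand: 6 DOF
  let cols := cols ++
    [ prefix_ ++ ".right_hand.thumbCMC",
      prefix_ ++ ".right_hand.thumbMCP",
      prefix_ ++ ".right_hand.indexMCP",
      prefix_ ++ ".right_hand.middleMCP",
      prefix_ ++ ".right_hand.ringMCP",
      prefix_ ++ ".right_hand.littleMCP" ]
  -- right_leg: 6 DOF
  let cols := cols ++ (PySem.List.pyRange 0 6 1).map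
    (fun i => prefix_ ++ (".right_leg." ++ PySem.Int.toStr i))
  -- waist: 3 DOF
  let cols := cols ++ (PySem.List.pyRange 0 3 1).map
    (fun i => prefix_ ++ (".waist." ++ PySem.Int.toStr i))
  cols

-- ===== PORT B =====
def pvHandSuffixes : List String :=
  ["thumbCMC", "thumbMCP", "indexMCP", "middleMCP", "ringMCP", "littleMCP"]

-- segment spec table: (segment name, style, DOF count)
def pvSegments : List (String × String × Int) :=
  [ ("left_arm", "joint", 7),
    ("left_hand", "hand", 6),
    ("left_leg", "index", 6),
    ("neck", "index", 3),
    ("right_arm", "joint", 7),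
    ("right_hand", "hand", 6),
    ("right_leg", "index", 6),
    ("waist", "index", 3) ]

def build_vector_column_names_alt (prefix_ : String) : List String :=
  pvSegments.foldl (fun cols spec =>
    let seg := spec.1; let style := spec.2.1; let n := spec.2.2
    (PySem.List.pyRange 0 n 1).foldl (fun cols i =>
      let suffix :=
        if style == "joint" then "joint_" ++ PySem.Int.toStr (i + 1)
        else if style == "hand" then PySem.List.pyGetD pvHandSuffixes i ""
        else PySem.Int.toStr i
      cols ++ [prefix_ ++ ("." ++ seg ++ "." ++ suffix)]) cols) []

-- ===== PRECONDITION & SPEC =====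
def Spec_build_vector_column_names (prefix_ : String) (out : List String) : Prop := out = build_vector_column_names_alt prefix_
instance (prefix_ : String) (out : List String) : Decidable (Spec_build_vector_column_names prefix_ out) := by unfold Spec_build_vector_column_names; infer_instance

-- ===== CLAIM (what is proved, stated in full; the proofs are below) =====
def Claim_equal_build_vector_column_names : Prop := ∀ (prefix_ : String), Dom_build_vector_column_names prefix_ → Spec_build_vector_column_names prefix_ (build_vector_column_names prefix_)

-- ===== LEMMAS AND PROOFS =====

-- Both ports reduce, for a free prefix_, to the same 44-element list of
-- prefix_ ++ <literal> terms; the closed suffix parts evaluate to equal literals.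
theorem pv_toStr_eval : PySem.Int.toStr 0 = "0" ∧ PySem.Int.toStr 1 = "1" ∧
    PySem.Int.toStr 2 = "2" ∧ PySem.Int.toStr 3 = "3" ∧ PySem.Int.toStr 4 = "4" ∧
    PySem.Int.toStr 5 = "5" ∧ PySem.Int.toStr 6 = "6" ∧ PySem.Int.toStr 7 = "7" := by decide

theorem build_vector_column_names_eq_alt (prefix_ : String) :
    build_vector_column_names prefix_ = build_vector_column_names_alt prefix_ := by
  obtain ⟨h0, h1, h2, h3, h4, h5, h6, h7⟩ := pv_toStr_eval
  simp [build_vector_column_names, build_vector_column_names_alt, pvSegments, pvHandSuffixes,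
    PySem.List.pyRange_one, List.range_succ, PySem.List.pyGetD,
    h0, h1, h2, h3, h4, h5, h6, h7]

-- ===== VERDICT (by name: the statement is the Claim_ definition above) =====
theorem build_vector_column_names_spec : Claim_equal_build_vector_column_names := by
  intro prefix_ _
  exact build_vector_column_names_eq_alt prefix_
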